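-- pv_equiv track=rewrite | github.com/MariD3v/Python | Challenges/44_Reto.py | robot
-- ===== SOURCE A (Python) =====
-- def robot(movimientos):
--     coordenadas_finales = [0, 0]
--     direccion = 0
--     #0: mirando hacia arriba (eje y positivo), 1: mirando hacia la izquierda, 2: mirando hacia abajo, 3: mirando hacia la derecha
--
--     for movimiento in movimientos:
--         if direccion == 0:
--             coordenadas_finales[1] += movimiento
--         elif direccion == 1:
--             coordenadas_finales[0] -= movimiento
--         elif direccion == 2:
--             coordenadas_finales[1] -= movimiento
--         elif direccion == 3:
--             coordenadas_finales[0] += movimiento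
--
--         direccion = (direccion - 1) % 4  # Girar 90 grados en sentido contrario a las agujas del reloj
--
--     return {'x': coordenadas_finales[0], 'y': coordenadas_finales[1]}
-- ===== SOURCE B (Python) =====
-- def robot(movimientos):
--     y = sum(m * [1, 0, -1, 0][i % 4] for i, m in enumerate(movimientos))
--     x = sum(m * [0, 1, 0, -1][i % 4] for i, m in enumerate(movimientos))
--     return {'x': x, 'y': y}
-- ===== Notes on version B (the rewrite author's own statement) =====
-- stated objective: simpler
-- what changed: Replaced the rotating direction state machine and per-step if/elif chain by two stateless passes that multiply each move by a fixed coefficient table indexed by position mod 4.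
import Mathlib
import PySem

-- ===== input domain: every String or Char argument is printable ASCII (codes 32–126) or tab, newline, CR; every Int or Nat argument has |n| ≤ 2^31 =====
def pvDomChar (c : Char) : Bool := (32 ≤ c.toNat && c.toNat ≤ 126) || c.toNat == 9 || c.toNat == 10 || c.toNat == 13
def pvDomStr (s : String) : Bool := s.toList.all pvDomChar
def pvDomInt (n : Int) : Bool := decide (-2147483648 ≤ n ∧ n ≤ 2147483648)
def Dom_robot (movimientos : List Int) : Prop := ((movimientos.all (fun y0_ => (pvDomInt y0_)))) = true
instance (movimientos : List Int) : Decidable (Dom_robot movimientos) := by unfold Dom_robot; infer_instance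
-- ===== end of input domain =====

-- B replaces A's rotating direction state machine by two stateless coefficient-table passes (objective: simpler).

-- ===== PORT A =====
-- one iteration of A's loop body: state = (coordX, coordY, direccion)
def robotStep (s : Int × Int × Int) (m : Int) : Int × Int × Int :=
  let x := s.1
  let y := s.2.1
  let d := s.2.2
  let xy :=
    if d = 0 then (x, y + m)
    else if d = 1 then (x - m, y)
    else if d = 2 then (x, y - m)
    else if d = 3 then (x + m, y)
    else (x, y)
  (xy.1, xy.2, PySem.Int.mod (d - 1) 4)

def robot (movimientos : List Int) : List (String × Int) :=
  let st := movimientos.foldl robotStep (0, 0, 0)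
  [("x", st.1), ("y", st.2.1)]

-- ===== PORT B =====
def pvYCoef : List Int := [1, 0, -1, 0]
def pvXCoef : List Int := [0, 1, 0, -1]

def robot_alt (movimientos : List Int) : List (String × Int) :=
  let y := ((PySem.List.enumerate movimientos 0).map
    (fun p => p.2 * PySem.List.pyGetD pvYCoef (PySem.Int.mod p.1 4) 0)).sum
  let x := ((PySem.List.enumerate movimientos 0).map
    (fun p => p.2 * PySem.List.pyGetD pvXCoef (PySem.Int.mod p.1 4) 0)).sum
  [("x", x), ("y", y)]

-- ===== PRECONDITION & SPEC =====
def Spec_robot (movimientos : List Int) (out : List (String × Int)) : Prop := out = robot_alt movimientos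
instance (movimientos : List Int) (out : List (String × Int)) : Decidable (Spec_robot movimientos out) := by unfold Spec_robot; infer_instance

-- ===== CLAIM (what is proved, stated in full; the proofs are below) =====
def Claim_equal_robot : Prop := ∀ (movimientos : List Int), Dom_robot movimientos → Spec_robot movimientos (robot movimientos)

-- ===== LEMMAS AND PROOFS =====

-- one step of A, at a position whose index s has the given phase, adds exactly B's coefficient contribution
lemma robotStep_eq (s x y m : Int) :
    robotStep (x, y, PySem.Int.mod (-s) 4) m =
      (x + m * PySem.List.pyGetD pvXCoef (PySem.Int.mod s 4) 0,
       y + m * PySem.List.pyGetD pvYCoef (PySem.Int.mod s 4) 0,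
       PySem.Int.mod (-(s + 1)) 4) := by
  have hmod : ∀ a : Int, PySem.Int.mod a 4 = a % 4 :=
    fun a => PySem.Int.mod_eq_emod_of_pos (by norm_num)
  have cx0 : PySem.List.pyGetD pvXCoef (0 : Int) 0 = 0 := by decide
  have cx1 : PySem.List.pyGetD pvXCoef (1 : Int) 0 = 1 := by decide
  have cx2 : PySem.List.pyGetD pvXCoef (2 : Int) 0 = 0 := by decide
  have cx3 : PySem.List.pyGetD pvXCoef (3 : Int) 0 = -1 := by decide
  have cy0 : PySem.List.pyGetD pvYCoef (0 : Int) 0 = 1 := by decide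
  have cy1 : PySem.List.pyGetD pvYCoef (1 : Int) 0 = 0 := by decide
  have cy2 : PySem.List.pyGetD pvYCoef (2 : Int) 0 = -1 := by decide
  have cy3 : PySem.List.pyGetD pvYCoef (3 : Int) 0 = 0 := by decide
  have h4 : s % 4 = 0 ∨ s % 4 = 1 ∨ s % 4 = 2 ∨ s % 4 = 3 := by omega
  simp only [robotStep, hmod]
  rcases h4 with h | h | h | h
  · rw [show (-s) % 4 = 0 by omega, h, cx0, cy0]
    exact congrArg₂ Prod.mk (by norm_num) (congrArg₂ Prod.mk (by norm_num) (by omega))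
  · rw [show (-s) % 4 = 3 by omega, h, cx1, cy1]
    exact congrArg₂ Prod.mk (by norm_num) (congrArg₂ Prod.mk (by norm_num) (by omega))
  · rw [show (-s) % 4 = 2 by omega, h, cx2, cy2]
    exact congrArg₂ Prod.mk (by norm_num) (congrArg₂ Prod.mk (by norm_num; ring) (by omega))
  · rw [show (-s) % 4 = 1 by omega, h, cx3, cy3]
    exact congrArg₂ Prod.mk (by norm_num; ring) (congrArg₂ Prod.mk (by norm_num) (by omega))

-- A's loop, started at any phase, computes B's two coefficient sums from that phase on
lemma robot_loop (xs : List Int) : ∀ (s x y : Int), 0 ≤ s →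
    List.foldl robotStep (x, y, PySem.Int.mod (-s) 4) xs =
      (x + ((PySem.List.enumerate xs s).map
              (fun p => p.2 * PySem.List.pyGetD pvXCoef (PySem.Int.mod p.1 4) 0)).sum,
       y + ((PySem.List.enumerate xs s).map
              (fun p => p.2 * PySem.List.pyGetD pvYCoef (PySem.Int.mod p.1 4) 0)).sum,
       PySem.Int.mod (-(s + xs.length)) 4) := by
  induction xs with
  | nil =>
    intro s x y hs
    simp [PySem.List.enumerate_nil]
  | cons m xs ih =>
    intro s x y hs
    rw [PySem.List.enumerate_cons]
    simp only [List.foldl_cons, List.map_cons, List.sum_cons]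
    rw [robotStep_eq s x y m, ih (s + 1) _ _ (by omega)]
    refine congrArg₂ _ (by ring) (congrArg₂ _ (by ring) ?_)
    have : -(s + 1 + (xs.length : Int)) = -(s + ((xs.length : Int) + 1)) := by ring
    rw [this]
    simp

-- ===== VERDICT (by name: the statement is the Claim_ definition above) =====
theorem robot_spec : Claim_equal_robot := by
  intro movimientos _
  show robot movimientos = robot_alt movimientos
  have h0 : (0, 0, (0 : Int)) = ((0 : Int), (0 : Int), PySem.Int.mod (-(0 : Int)) 4) := by decide
  simp only [robot, robot_alt, h0]
  rw [robot_loop movimientos 0 0 0 (le_refl 0)]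
  simp
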